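-- pv_equiv track=rewrite | github.com/chadbostick/demesne | mechanics/strategies.py | resolve_strategy_rolls
-- ===== SOURCE A (Python) =====
-- PAYOUT_TABLE: list = [
--     (1,  1,  0, 0),
--     (2,  12, 1, 0),
--     (13, 19, 2, 0),
--     (20, 20, 3, 1),  # 3 of color + 1 of any color
-- ]
--
-- def lookup_payout(roll: int) -> tuple[int, int]:
--     """Returns (base_tokens, bonus_choice_tokens) for a single die roll."""
--     for (lo, hi, base, bonus) in PAYOUT_TABLE:
--         if lo <= roll <= hi:
--             return (base, bonus)
--     return (0, 0)
--
-- def resolve_strategy_rolls(rolls: list[int]) -> tuple[int, int]: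
--     """
--     Evaluate each die independently against the payout table and sum results.
--     Returns (total_base, total_bonus).
--     """
--     total_base = 0
--     total_bonus = 0
--     for r in rolls:
--         base, bonus = lookup_payout(r)
--         total_base += base
--         total_bonus += bonus
--     return total_base, total_bonus
-- ===== SOURCE B (Python) =====
-- PAYOUT_TABLE: list = [
--     (1,  1,  0, 0),
--     (2,  12, 1, 0),
--     (13, 19, 2, 0),
--     (20, 20, 3, 1),  # 3 of color + 1 of any color
-- ]
--
-- def resolve_strategy_rolls(rolls: list[int]) -> tuple[int, int]:
--     """Tally-then-weight: for each payout row count the rolls in its range once,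
--     then add count*base and count*bonus; rolls outside all ranges contribute 0."""
--     total_base = 0
--     total_bonus = 0
--     for (lo, hi, base, bonus) in PAYOUT_TABLE:
--         m = sum(1 for r in rolls if lo <= r <= hi)
--         total_base += m * base
--         total_bonus += m * bonus
--     return (total_base, total_bonus)
-- ===== Notes on version B (the rewrite author's own statement) =====
-- stated objective: alternative
-- what changed: B inverts the loop structure: instead of looking up each roll in the payout table and accumulating per roll, it iterates once over the payout table rows and for each row counts the rolls falling in that range, adding count*base and count*bonus.
import Mathlib
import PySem

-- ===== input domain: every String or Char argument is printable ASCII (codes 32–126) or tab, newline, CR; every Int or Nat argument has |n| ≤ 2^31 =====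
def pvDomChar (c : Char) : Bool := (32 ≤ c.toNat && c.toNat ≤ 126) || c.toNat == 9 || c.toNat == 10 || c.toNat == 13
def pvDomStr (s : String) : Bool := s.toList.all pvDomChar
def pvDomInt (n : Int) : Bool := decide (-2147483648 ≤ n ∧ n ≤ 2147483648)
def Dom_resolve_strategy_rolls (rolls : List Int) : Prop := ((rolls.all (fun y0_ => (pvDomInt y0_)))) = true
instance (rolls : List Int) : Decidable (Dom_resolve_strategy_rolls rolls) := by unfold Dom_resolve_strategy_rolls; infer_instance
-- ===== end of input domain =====

-- B inverts the loops: it aggregates over the payout table with a per-range count of rolls instead of a per-roll table lookup (alternative decomposition, same cost).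


-- ===== PORT A =====
def PAYOUT_TABLE : List (Int × Int × Int × Int) :=
  [(1, 1, 0, 0), (2, 12, 1, 0), (13, 19, 2, 0), (20, 20, 3, 1)]

-- Python's 'for … in PAYOUT_TABLE: if lo <= roll <= hi: return …' / fallthrough return (0,0)
def lookup_payout_go (roll : Int) : List (Int × Int × Int × Int) → Int × Int
  | [] => (0, 0)
  | (lo, hi, base, bonus) :: rest =>
      if lo ≤ roll ∧ roll ≤ hi then (base, bonus) else lookup_payout_go roll rest

def lookup_payout (roll : Int) : Int × Int := lookup_payout_go roll PAYOUT_TABLE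

def resolve_strategy_rolls (rolls : List Int) : Int × Int :=
  rolls.foldl (fun acc r =>
    let p := lookup_payout r
    (acc.1 + p.1, acc.2 + p.2)) (0, 0)

-- ===== PORT B =====
def resolve_strategy_rolls_alt (rolls : List Int) : Int × Int :=
  PAYOUT_TABLE.foldl (fun acc row =>
    let m : Int := (rolls.filter (fun r => decide (row.1 ≤ r ∧ r ≤ row.2.1))).length
    (acc.1 + m * row.2.2.1, acc.2 + m * row.2.2.2)) (0, 0)

-- ===== PRECONDITION & SPEC =====
def Spec_resolve_strategy_rolls (rolls : List Int) (out : Int × Int) : Prop := out = resolve_strategy_rolls_alt rolls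
instance (rolls : List Int) (out : Int × Int) : Decidable (Spec_resolve_strategy_rolls rolls out) := by unfold Spec_resolve_strategy_rolls; infer_instance

-- ===== CLAIM (what is proved, stated in full; the proofs are below) =====
def Claim_equal_resolve_strategy_rolls : Prop := ∀ (rolls : List Int), Dom_resolve_strategy_rolls rolls → Spec_resolve_strategy_rolls rolls (resolve_strategy_rolls rolls)

-- ===== LEMMAS AND PROOFS =====

-- B in closed form: the four range counts, weighted.
theorem alt_closed (rolls : List Int) :
    resolve_strategy_rolls_alt rolls =
      (((rolls.filter (fun r => decide (2 ≤ r ∧ r ≤ 12))).length : Int) * 1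
         + ((rolls.filter (fun r => decide (13 ≤ r ∧ r ≤ 19))).length : Int) * 2
         + ((rolls.filter (fun r => decide (20 ≤ r ∧ r ≤ 20))).length : Int) * 3,
       ((rolls.filter (fun r => decide (20 ≤ r ∧ r ≤ 20))).length : Int) * 1) := by
  simp [resolve_strategy_rolls_alt, PAYOUT_TABLE]

-- B adds exactly A's per-roll payout when a roll is prepended.
theorem alt_cons (r : Int) (rest : List Int) :
    resolve_strategy_rolls_alt (r :: rest) =
      ((lookup_payout r).1 + (resolve_strategy_rolls_alt rest).1,
       (lookup_payout r).2 + (resolve_strategy_rolls_alt rest).2) := by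
  simp only [alt_closed, List.filter_cons]
  simp only [lookup_payout, PAYOUT_TABLE, lookup_payout_go]
  split_ifs <;> refine Prod.ext ?_ ?_ <;> simp_all <;> omega

theorem foldA_eq (rolls : List Int) : ∀ acc : Int × Int,
    rolls.foldl (fun acc r =>
        let p := lookup_payout r
        (acc.1 + p.1, acc.2 + p.2)) acc =
      (acc.1 + (resolve_strategy_rolls_alt rolls).1,
       acc.2 + (resolve_strategy_rolls_alt rolls).2) := by
  induction rolls with
  | nil => intro acc; simp [resolve_strategy_rolls_alt, PAYOUT_TABLE]
  | cons r rest ih =>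
      intro acc
      simp only [List.foldl_cons, ih, alt_cons]
      refine Prod.ext ?_ ?_ <;> simp [add_assoc]

-- ===== VERDICT (by name: the statement is the Claim_ definition above) =====
theorem resolve_strategy_rolls_spec : Claim_equal_resolve_strategy_rolls := by
  intro rolls _
  unfold Spec_resolve_strategy_rolls resolve_strategy_rolls
  rw [foldA_eq]
  simp
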